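-- pv_equiv track=rewrite | github.com/ozcodx/mailprocessor | processors/financial_data.py | clasificar_categoria
-- ===== SOURCE A (Python) =====
-- CATEGORIAS = {
--     "animales": ["1445"],  # Semovientes
--     "praderas": ["1504"],  # Terrenos
--     "oficina": ["2335"],   # Costos y gastos por pagar
--     "legal": ["2365", "2370", "25"],  # Retenciones, aportes y beneficios a empleados
--     "mejoras": ["1520", "1524", "1540", "1592"],  # Maquinaria, equipo, flota y depreciación
--     "otros": []  # Categoría por defecto para códigos que no coinciden con ninguna otra categoría
-- }
--
-- def clasificar_categoria(codigo, descripcion):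
--     """
--     Clasifica una cuenta contable según su código en una de las categorías definidas.
--     Usa la jerarquía de IDs para determinar la categoría.
--
--     Args:
--         codigo (str): Código de la cuenta contable.
--         descripcion (str): Descripción de la cuenta contable.
--
--     Returns:
--         str: Categoría (animales, praderas, oficina, legal, mejoras, otros).
--     """
--     if not codigo:
--         return "otros"
--
--     # Convertir a string si no lo es
--     codigo_str = str(codigo)
--
--     # Ignorar códigos que empiezan por 3 (patrimonio)
--     if codigo_str.startswith('3'):
--         return "otros"
--
--     # Buscar coincidencias con los IDs principales de cada categoría
--     for categoria, ids_principales in CATEGORIAS.items():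
--         for id_principal in ids_principales:
--             # Si el código actual es un ancestro del ID principal
--             if codigo_str.startswith(id_principal):
--                 return categoria
--
--     # Si no hay coincidencias, asignar a "otros"
--     return "otros"
-- ===== SOURCE B (Python) =====
-- # Idiomatic longest-prefix-first lookup against a flat prefix->category dict
-- PREFIX_TO_CAT = {
--     "1445": "animales",
--     "1504": "praderas",
--     "2335": "oficina",
--     "2365": "legal",
--     "2370": "legal",
--     "25": "legal",
--     "1520": "mejoras",
--     "1524": "mejoras",
--     "1540": "mejoras",
--     "1592": "mejoras",
-- }
--
-- def clasificar_categoria(codigo, descripcion):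
--     if not codigo:
--         return "otros"
--     codigo_str = str(codigo)
--     if codigo_str.startswith('3'):
--         return "otros"
--     for L in (4, 2):
--         cat = PREFIX_TO_CAT.get(codigo_str[:L])
--         if cat is not None:
--             return cat
--     return "otros"
-- ===== Notes on version B (the rewrite author's own statement) =====
-- stated objective: idiomatic
-- what changed: Replaces the nested scan over every category's prefix list with a single flat prefix->category dict probed longest-prefix-first (codigo[:4], then codigo[:2]); correctness of dropping the category order relies on no prefix being a prefix of another.
import Mathlib
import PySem

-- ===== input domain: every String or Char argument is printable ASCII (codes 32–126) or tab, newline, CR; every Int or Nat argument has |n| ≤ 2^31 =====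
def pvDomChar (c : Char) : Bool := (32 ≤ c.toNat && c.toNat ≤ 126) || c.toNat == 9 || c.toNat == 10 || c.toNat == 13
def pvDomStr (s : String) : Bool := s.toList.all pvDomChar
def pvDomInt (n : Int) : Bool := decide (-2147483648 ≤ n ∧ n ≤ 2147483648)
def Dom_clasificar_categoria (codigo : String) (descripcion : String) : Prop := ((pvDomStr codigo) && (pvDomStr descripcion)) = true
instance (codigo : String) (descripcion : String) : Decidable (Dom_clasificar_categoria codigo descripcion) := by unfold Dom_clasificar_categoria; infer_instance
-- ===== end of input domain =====

-- B replaces A's nested scan over the category table by a flat prefix->category dict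
-- probed longest-prefix-first (codigo[:4] then codigo[:2]) — idiomatic, same cost class.
-- Strings are handled as their code-point lists (PySem.Chars / PySem.List), which is exact.

-- ===== PORT A =====
def pvCATEGORIAS : List (String × List (List Char)) :=
  [("animales", [['1','4','4','5']]),
   ("praderas", [['1','5','0','4']]),
   ("oficina", [['2','3','3','5']]),
   ("legal", [['2','3','6','5'], ['2','3','7','0'], ['2','5']]),
   ("mejoras", [['1','5','2','0'], ['1','5','2','4'], ['1','5','4','0'], ['1','5','9','2']]),
   ("otros", [])]

-- inner 'for id_principal in ids_principales' with early return
def pvScanIds (cs : List Char) (categoria : String) : List (List Char) → Option String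
  | [] => none
  | p :: rest =>
      if PySem.Chars.startswith cs p then some categoria else pvScanIds cs categoria rest

-- outer 'for categoria, ids_principales in CATEGORIAS.items()' with early return
def pvScanCats (cs : List Char) : List (String × List (List Char)) → Option String
  | [] => none
  | (categoria, ids) :: rest =>
      match pvScanIds cs categoria ids with
      | some r => some r
      | none => pvScanCats cs rest

def clasificar_categoria (codigo : String) (descripcion : String) : String :=
  if codigo.toList = [] then "otros"
  else if PySem.Chars.startswith codigo.toList ['3'] then "otros"
  else match pvScanCats codigo.toList pvCATEGORIAS with
       | some c => c
       | none => "otros"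

-- ===== PORT B =====
-- keys are the prefix strings as code-point lists (codigo_str[:L] is ported as the List slice on code points)
def pvPREFIX_TO_CAT : PySem.Dict (List Char) String :=
  ⟨[(['1','4','4','5'], "animales"), (['1','5','0','4'], "praderas"), (['2','3','3','5'], "oficina"),
    (['2','3','6','5'], "legal"), (['2','3','7','0'], "legal"), (['2','5'], "legal"),
    (['1','5','2','0'], "mejoras"), (['1','5','2','4'], "mejoras"), (['1','5','4','0'], "mejoras"), (['1','5','9','2'], "mejoras")]⟩

-- 'for L in (4, 2)' with early return on a dict hit
def pvProbe (cs : List Char) : List Int → String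
  | [] => "otros"
  | L :: rest =>
      match PySem.Dict.get? pvPREFIX_TO_CAT (PySem.List.slice cs none (some L)) with
      | some cat => cat
      | none => pvProbe cs rest

def clasificar_categoria_alt (codigo : String) (descripcion : String) : String :=
  if codigo.toList = [] then "otros"
  else if PySem.Chars.startswith codigo.toList ['3'] then "otros"
  else pvProbe codigo.toList [4, 2]

-- ===== PRECONDITION & SPEC =====
def Spec_clasificar_categoria (codigo : String) (descripcion : String) (out : String) : Prop := out = clasificar_categoria_alt codigo descripcion
instance (codigo : String) (descripcion : String) (out : String) : Decidable (Spec_clasificar_categoria codigo descripcion out) := by unfold Spec_clasificar_categoria; infer_instance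

-- ===== CLAIM (what is proved, stated in full; the proofs are below) =====
def Claim_equal_clasificar_categoria : Prop := ∀ (codigo : String) (descripcion : String), Dom_clasificar_categoria codigo descripcion → Spec_clasificar_categoria codigo descripcion (clasificar_categoria codigo descripcion)

-- ===== LEMMAS AND PROOFS =====

-- both scans only read the first four code points; case on them and compute both chains
set_option maxHeartbeats 1000000 in
theorem pv_scan_eq_probe (cs : List Char) :
    (match pvScanCats cs pvCATEGORIAS with
     | some c => c
     | none => "otros") = pvProbe cs [4, 2] := by
  match cs with
  | [] =>
      simp [pvScanCats, pvScanIds, pvCATEGORIAS, pvProbe, pvPREFIX_TO_CAT,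
        PySem.Dict.get?, PySem.Chars.startswith, PySem.List.slice, PySem.List.clampIdx]
  | [a] =>
      simp only [pvScanCats, pvScanIds, pvCATEGORIAS, pvProbe, pvPREFIX_TO_CAT,
        PySem.Dict.get?_mk_cons, PySem.Chars.startswith, List.isPrefixOf, beq_iff_eq]
      norm_num [PySem.List.slice, PySem.List.clampIdx, PySem.Dict.get?]
      try simp only [show Int.toNat 4 = 4 from rfl, show Int.toNat 2 = 2 from rfl]
      try norm_num
      split_ifs <;> first | rfl | simp_all
  | [a, b] =>
      simp only [pvScanCats, pvScanIds, pvCATEGORIAS, pvProbe, pvPREFIX_TO_CAT,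
        PySem.Dict.get?_mk_cons, PySem.Chars.startswith, List.isPrefixOf, beq_iff_eq]
      norm_num [PySem.List.slice, PySem.List.clampIdx, PySem.Dict.get?]
      try simp only [show Int.toNat 2 = 2 from rfl]
      try norm_num
      split_ifs <;> first | rfl | simp_all
  | [a, b, c] =>
      simp only [pvScanCats, pvScanIds, pvCATEGORIAS, pvProbe, pvPREFIX_TO_CAT,
        PySem.Dict.get?_mk_cons, PySem.Chars.startswith, List.isPrefixOf, beq_iff_eq]
      norm_num [PySem.List.slice, PySem.List.clampIdx, PySem.Dict.get?]
      try simp only [show Int.toNat 2 = 2 from rfl]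
      try norm_num
      split_ifs <;> first | rfl | simp_all
  | a :: b :: c :: d :: rest =>
      have h4 : PySem.List.slice (a::b::c::d::rest) none (some 4) = [a,b,c,d] := by
        simp [PySem.List.slice, PySem.List.clampIdx]
      have h2 : PySem.List.slice (a::b::c::d::rest) none (some 2) = [a,b] := by
        simp [PySem.List.slice, PySem.List.clampIdx]
      simp only [pvScanCats, pvScanIds, pvCATEGORIAS, pvProbe, pvPREFIX_TO_CAT, h4, h2,
        PySem.Dict.get?_mk_cons, PySem.Chars.startswith, List.isPrefixOf, beq_iff_eq]
      norm_num [PySem.Dict.get?]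
      -- the '25' rule fires only when a = '2', where no 'mejoras' rule can fire: split on that
      by_cases h2a : '2' = a
      · subst h2a
        simp only [show (('1' : Char) = '2') = False from by decide,
          show ∀ x y : Char, (([x, y] : List Char) = []) = False from fun x y => by simp,
          false_and, and_false, if_false]
        split_ifs <;> rfl
      · simp only [eq_false h2a,
          show ∀ x y : Char, (([x, y] : List Char) = []) = False from fun x y => by simp,
          false_and, and_false, if_false]
        split_ifs <;> rfl

theorem pv_main (codigo descripcion : String) :
    clasificar_categoria codigo descripcion = clasificar_categoria_alt codigo descripcion := by
  unfold clasificar_categoria clasificar_categoria_alt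
  by_cases hnil : codigo.toList = []
  · simp [hnil]
  · by_cases h3 : PySem.Chars.startswith codigo.toList ['3'] = true
    · simp [hnil, h3]
    · simp only [hnil, h3, if_false, Bool.false_eq_true]
      exact pv_scan_eq_probe codigo.toList

-- ===== VERDICT (by name: the statement is the Claim_ definition above) =====
theorem clasificar_categoria_spec : Claim_equal_clasificar_categoria := by
  intro codigo descripcion _
  unfold Spec_clasificar_categoria
  exact pv_main codigo descripcion
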